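-- pv_equiv track=rewrite | github.com/Mahdi-Soleymani/QGT_GNN | src/run_exp.py | BER
-- ===== SOURCE A (Python) =====
-- def BER(true,predict):
--
--     false_negative=0
--     for x in true:
--         if x not in predict:
--             false_negative+=1
--
--     false_positive=0
--     for y in predict:
--         if y not in true:
--             false_positive+=1
--
--     error=false_negative+false_positive
--
--     return (error, false_negative, false_positive)
-- ===== SOURCE B (Python) =====
-- def BER(true, predict):
--     # Sort both lists, then one merge-style two-pointer sweep counts, per side,
--     # the occurrences whose value never appears on the other side.
--     t = sorted(true)
--     p = sorted(predict)
--     i = j = 0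
--     fn = fp = 0
--     while i < len(t) and j < len(p):
--         if t[i] < p[j]:
--             fn += 1
--             i += 1
--         elif p[j] < t[i]:
--             fp += 1
--             j += 1
--         else:
--             v = t[i]
--             while i < len(t) and t[i] == v:
--                 i += 1
--             while j < len(p) and p[j] == v:
--                 j += 1
--     fn += len(t) - i
--     fp += len(p) - j
--     return (fn + fp, fn, fp)
-- ===== Notes on version B (the rewrite author's own statement) =====
-- stated objective: faster
-- what changed: B sorts both lists and runs one merge-style two-pointer sweep over the two sorted sequences, counting per-side occurrences of unmatched values and skipping duplicate runs, instead of A's per-element linear membership scan of the other list.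
import Mathlib
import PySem

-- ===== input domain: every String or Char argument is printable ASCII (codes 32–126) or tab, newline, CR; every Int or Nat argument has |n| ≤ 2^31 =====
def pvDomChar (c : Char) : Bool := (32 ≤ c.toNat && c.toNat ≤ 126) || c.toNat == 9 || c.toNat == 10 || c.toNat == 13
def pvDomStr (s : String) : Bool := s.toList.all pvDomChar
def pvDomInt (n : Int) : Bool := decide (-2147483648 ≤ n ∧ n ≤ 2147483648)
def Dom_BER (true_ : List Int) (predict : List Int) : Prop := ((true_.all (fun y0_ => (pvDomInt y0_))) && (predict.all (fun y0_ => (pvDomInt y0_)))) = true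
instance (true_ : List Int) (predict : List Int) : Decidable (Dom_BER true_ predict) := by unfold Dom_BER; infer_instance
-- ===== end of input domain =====

-- B sorts both lists and counts the unmatched occurrences in one merge-style two-pointer sweep,
-- replacing A's per-element membership scan of the other list (faster; different algorithm).

-- ===== PORT A =====
def BER (true_ : List Int) (predict : List Int) : Int × Int × Int :=
  let false_negative : Int :=
    true_.foldl (fun acc x => if predict.contains x then acc else acc + 1) 0
  let false_positive : Int :=
    predict.foldl (fun acc y => if true_.contains y then acc else acc + 1) 0
  let error := false_negative + false_positive
  (error, false_negative, false_positive)

-- ===== PORT B =====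
-- inner `while … == v` loops of Source B: drop the leading run of elements equal to v
def skipEq (v : Int) : List Int → List Int
  | [] => []
  | x :: xs => if x == v then skipEq v xs else x :: xs

lemma skipEq_length_le (v : Int) (l : List Int) : (skipEq v l).length ≤ l.length := by
  induction l with
  | nil => simp [skipEq]
  | cons x xs ih =>
    simp only [skipEq]
    split
    · exact le_trans ih (by simp)
    · simp

-- the main while loop of Source B: two pointers over the sorted lists, fn/fp accumulators;
-- running off one list adds the other's remaining length (the two final `+=` lines)
def mergeCount : List Int → List Int → Int → Int → Int × Int
  | [], p, fn, fp => (fn, fp + p.length)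
  | a :: t, [], fn, fp => (fn + (a :: t).length, fp)
  | a :: t, b :: p, fn, fp =>
    if a < b then mergeCount t (b :: p) (fn + 1) fp
    else if b < a then mergeCount (a :: t) p fn (fp + 1)
    else mergeCount (skipEq a t) (skipEq b p) fn fp
  termination_by t p _ _ => t.length + p.length
  decreasing_by
  · simp
  · simp
  · have h1 := skipEq_length_le a t
    have h2 := skipEq_length_le b p
    simp
    omega

def BER_alt (true_ : List Int) (predict : List Int) : Int × Int × Int :=
  let t := PySem.List.sorted true_ (fun x => x) false
  let p := PySem.List.sorted predict (fun x => x) false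
  let r := mergeCount t p 0 0
  (r.1 + r.2, r.1, r.2)

-- ===== PRECONDITION & SPEC =====
def Spec_BER (true_ : List Int) (predict : List Int) (out : Int × Int × Int) : Prop := out = BER_alt true_ predict
instance (true_ : List Int) (predict : List Int) (out : Int × Int × Int) : Decidable (Spec_BER true_ predict out) := by unfold Spec_BER; infer_instance

-- ===== CLAIM (what is proved, stated in full; the proofs are below) =====
def Claim_equal_BER : Prop := ∀ (true_ : List Int) (predict : List Int), Dom_BER true_ predict → Spec_BER true_ predict (BER true_ predict)

-- ===== LEMMAS AND PROOFS =====

-- A's loop: accumulating count of elements failing the membership test.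
lemma foldl_notmem_count (p : List Int) (l : List Int) : ∀ (acc : Int),
    l.foldl (fun acc x => if p.contains x then acc else acc + 1) acc
      = acc + (l.countP (fun x => !p.contains x) : Int) := by
  induction l with
  | nil => simp
  | cons a l ih =>
    intro acc
    simp only [List.foldl_cons, List.countP_cons]
    by_cases h : p.contains a
    · rw [if_pos h, ih]
      have hh : (!p.contains a) = false := by rw [h]; rfl
      rw [hh]; simp
    · rw [if_neg h, ih]
      simp only [h, Bool.not_false, if_pos]
      push_cast; ring

lemma skipEq_sublist (v : Int) (l : List Int) : (skipEq v l).Sublist l := by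
  induction l with
  | nil => simp [skipEq]
  | cons x xs ih =>
    simp only [skipEq]
    split
    · exact ih.cons x
    · exact List.Sublist.refl _

lemma mem_skipEq {v x : Int} (hx : x ≠ v) (l : List Int) : x ∈ skipEq v l ↔ x ∈ l := by
  induction l with
  | nil => simp [skipEq]
  | cons c cs ih =>
    simp only [skipEq]
    split
    · rename_i h
      have : c = v := by simpa using h
      subst this
      simp [ih, hx]
    · simp

lemma countP_skipEq {q : Int → Bool} {v : Int} (hq : q v = false) (l : List Int) :
    l.countP q = (skipEq v l).countP q := by
  induction l with
  | nil => simp [skipEq]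
  | cons c cs ih =>
    simp only [skipEq]
    split
    · rename_i h
      have : c = v := by simpa using h
      subst this
      simp [hq, ih]
    · rfl

lemma skipEq_gt {v : Int} {l : List Int} (hs : l.Pairwise (· ≤ ·)) (hge : ∀ y ∈ l, v ≤ y) :
    ∀ x ∈ skipEq v l, v < x := by
  induction l with
  | nil => simp [skipEq]
  | cons c cs ih =>
    simp only [skipEq]
    split
    · exact ih (List.Pairwise.sublist (by simp) hs) (fun y hy => hge y (by simp [hy]))
    · rename_i h
      have hc : c ≠ v := by simpa using h
      have hcv : v < c := lt_of_le_of_ne (hge c (by simp)) (Ne.symm hc)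
      intro x hx
      rcases List.mem_cons.mp hx with rfl | hx
      · exact hcv
      · exact lt_of_lt_of_le hcv ((List.pairwise_cons.mp hs).1 x hx)

-- the merge sweep computes, on sorted inputs, exactly the two not-member counts
lemma mergeCount_spec : ∀ (n : Nat) (t p : List Int) (fn fp : Int),
    t.length + p.length ≤ n → t.Pairwise (· ≤ ·) → p.Pairwise (· ≤ ·) →
    mergeCount t p fn fp
      = (fn + (t.countP (fun x => !p.contains x) : Int),
         fp + (p.countP (fun y => !t.contains y) : Int)) := by
  intro n
  induction n with
  | zero =>
    intro t p fn fp hlen _ _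
    have ht : t = [] := by cases t <;> simp_all
    have hp : p = [] := by cases p <;> simp_all
    subst ht; subst hp
    simp [mergeCount]
  | succ n ih =>
    intro t p fn fp hlen hst hsp
    match t, p with
    | [], p =>
      simp [mergeCount]
    | a :: t, [] =>
      simp [mergeCount]
    | a :: t, b :: p =>
      have hst' := (List.pairwise_cons.mp hst).2
      have hsp' := (List.pairwise_cons.mp hsp).2
      have hta : ∀ y ∈ t, a ≤ y := (List.pairwise_cons.mp hst).1
      have hpb : ∀ y ∈ p, b ≤ y := (List.pairwise_cons.mp hsp).1
      rw [mergeCount]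
      by_cases hab : a < b
      · rw [if_pos hab]
        rw [ih t (b :: p) (fn + 1) fp (by simp at hlen ⊢; omega) hst' hsp]
        have hne : a ≠ b := by omega
        have hnp : a ∉ p := fun hm => by have := hpb a hm; omega
        have h1 : (a :: t).countP (fun x => !(b :: p).contains x)
            = t.countP (fun x => !(b :: p).contains x) + 1 := by
          simp [hne, hnp]
        have h2 : (b :: p).countP (fun y => !(a :: t).contains y)
            = (b :: p).countP (fun y => !t.contains y) := by
          refine List.countP_congr (fun y hy => ?_)
          have hya : y ≠ a := by
            rcases List.mem_cons.mp hy with rfl | hy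
            · omega
            · have := hpb y hy; omega
          simp [List.contains_eq_mem, hya]
        rw [h1, h2]
        simp only [Prod.mk.injEq]
        push_cast
        exact ⟨by ring, by first | trivial | ring⟩
      · rw [if_neg hab]
        by_cases hba : b < a
        · rw [if_pos hba]
          rw [ih (a :: t) p fn (fp + 1) (by simp at hlen ⊢; omega) hst hsp']
          have hne : b ≠ a := by omega
          have hnt : b ∉ t := fun hm => by have := hta b hm; omega
          have h1 : (b :: p).countP (fun y => !(a :: t).contains y)
              = p.countP (fun y => !(a :: t).contains y) + 1 := by
            simp [hne, hnt]
          have h2 : (a :: t).countP (fun x => !(b :: p).contains x)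
              = (a :: t).countP (fun x => !p.contains x) := by
            refine List.countP_congr (fun x hx => ?_)
            have hxb : x ≠ b := by
              rcases List.mem_cons.mp hx with rfl | hx
              · omega
              · have := hta x hx; omega
            simp [List.contains_eq_mem, hxb]
          rw [h1, h2]
          simp only [Prod.mk.injEq]
          push_cast
          exact ⟨by first | trivial | ring, by first | trivial | ring⟩
        · rw [if_neg hba]
          have hbe : b = a := by omega
          subst hbe
          have hlt : (skipEq b t).length + (skipEq b p).length ≤ n := by
            have h1 := skipEq_length_le b t
            have h2 := skipEq_length_le b p
            simp at hlen; omega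
          rw [ih (skipEq b t) (skipEq b p) fn fp hlt
              (List.Pairwise.sublist (skipEq_sublist b t) hst')
              (List.Pairwise.sublist (skipEq_sublist b p) hsp')]
          have htgt := skipEq_gt hst' hta
          have hpgt := skipEq_gt hsp' hpb
          have h1 : (b :: t).countP (fun x => !(b :: p).contains x)
              = (skipEq b t).countP (fun x => !(skipEq b p).contains x) := by
            have hqb : (!(b :: p).contains b) = false := by
              simp [List.contains_eq_mem]
            calc (b :: t).countP (fun x => !(b :: p).contains x)
                = t.countP (fun x => !(b :: p).contains x) := by
                  simp
              _ = (skipEq b t).countP (fun x => !(b :: p).contains x) :=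
                  countP_skipEq hqb t
              _ = (skipEq b t).countP (fun x => !(skipEq b p).contains x) := by
                  refine List.countP_congr (fun x hx => ?_)
                  have hxb : x ≠ b := by have := htgt x hx; omega
                  simp only [List.contains_eq_mem, List.mem_cons, hxb, false_or,
                    mem_skipEq hxb p]
          have h2 : (b :: p).countP (fun y => !(b :: t).contains y)
              = (skipEq b p).countP (fun y => !(skipEq b t).contains y) := by
            have hqb : (!(b :: t).contains b) = false := by
              simp [List.contains_eq_mem]
            calc (b :: p).countP (fun y => !(b :: t).contains y)
                = p.countP (fun y => !(b :: t).contains y) := by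
                  simp
              _ = (skipEq b p).countP (fun y => !(b :: t).contains y) :=
                  countP_skipEq hqb p
              _ = (skipEq b p).countP (fun y => !(skipEq b t).contains y) := by
                  refine List.countP_congr (fun y hy => ?_)
                  have hyb : y ≠ b := by have := hpgt y hy; omega
                  simp only [List.contains_eq_mem, List.mem_cons, hyb, false_or,
                    mem_skipEq hyb t]
          rw [h1, h2]

-- counts of not-membership are invariant under sorting both lists
lemma countP_sorted_notmem (l p : List Int) :
    ((PySem.List.sorted l (fun x => x) false).countP
        (fun x => !(PySem.List.sorted p (fun x => x) false).contains x))
      = l.countP (fun x => !p.contains x) := by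
  have hperm := PySem.List.sorted_perm l (fun x => x) false
  rw [hperm.countP_eq]
  refine List.countP_congr (fun x _ => ?_)
  have : x ∈ PySem.List.sorted p (fun x => x) false ↔ x ∈ p := by
    exact (PySem.List.sorted_perm p (fun x => x) false).mem_iff
  simp [List.contains_eq_mem, this]

-- ===== VERDICT (by name: the statement is the Claim_ definition above) =====
theorem BER_spec : Claim_equal_BER := by
  intro true_ predict _
  unfold Spec_BER BER BER_alt
  have hst : (PySem.List.sorted true_ (fun x => x) false).Pairwise (· ≤ ·) := by
    simpa using PySem.List.sorted_pairwise true_ (fun x => x)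
  have hsp : (PySem.List.sorted predict (fun x => x) false).Pairwise (· ≤ ·) := by
    simpa using PySem.List.sorted_pairwise predict (fun x => x)
  have key := mergeCount_spec ((PySem.List.sorted true_ (fun x => x) false).length
      + (PySem.List.sorted predict (fun x => x) false).length)
      (PySem.List.sorted true_ (fun x => x) false)
      (PySem.List.sorted predict (fun x => x) false) 0 0 le_rfl hst hsp
  simp only [key, countP_sorted_notmem, foldl_notmem_count]
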